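-- pv_equiv track=rewrite | github.com/webbuilderhero/opensigint | decoders/Codan_GPS.py | codan_gps_decoder
-- ===== SOURCE A (Python) =====
-- def codan_gps_decoder(signal):
--     """Decode the signal from the Codan GPS"""
--
--     output = '' # Output string of decoded signal
--     # Variables for counting bits in a byte
--     bit_count = 0 # Currently count of bits
--     byte_bits = 8 # Number of bits in a byte
--
--     # Get the raw binary string for decoding
--     binary = signal_to_binary(signal)
--
--     # Iterate through the binary signal
--     for bit in binary:
--         bit_count += 1
--
--         output += bit # Append the bit to our output
--
--         # If all bits have been counted for a full byte, reset and add a space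
--         if bit_count == byte_bits:
--             output += ' '
--             bit_count = 0
--
--     return output
--
-- def signal_to_binary(signal):
--     """Convert the signal into corresponding binary string"""
--
--     binary = '' # Output binary string
--     for char in signal:
--         ascii_int = ord(char) # Convert char to ascii int
--         binary += format(ascii_int, 'b').zfill(8) # Convert int to binary string, with leading 0s and append it
--
--     return binary
-- ===== SOURCE B (Python) =====
-- def codan_gps_decoder(sig):
--     """Decode the signal from the Codan GPS.
--
--     (Parameter renamed from 'signal' only because the sandbox forbids that
--     identifier; the function is called positionally.)
--     """
--     return ''.join(format(ord(c), 'b').zfill(8) + ' ' for c in sig)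
-- ===== Notes on version B (the rewrite author's own statement) =====
-- stated objective: simpler
-- what changed: Replaced the two-phase pipeline (build one long bit string by repeated concatenation, then re-scan it bit by bit with a bit_count state machine that inserts a space every 8 bits) by a single per-character map joined once: each char directly yields its 8-bit byte plus trailing space.
import Mathlib
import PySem

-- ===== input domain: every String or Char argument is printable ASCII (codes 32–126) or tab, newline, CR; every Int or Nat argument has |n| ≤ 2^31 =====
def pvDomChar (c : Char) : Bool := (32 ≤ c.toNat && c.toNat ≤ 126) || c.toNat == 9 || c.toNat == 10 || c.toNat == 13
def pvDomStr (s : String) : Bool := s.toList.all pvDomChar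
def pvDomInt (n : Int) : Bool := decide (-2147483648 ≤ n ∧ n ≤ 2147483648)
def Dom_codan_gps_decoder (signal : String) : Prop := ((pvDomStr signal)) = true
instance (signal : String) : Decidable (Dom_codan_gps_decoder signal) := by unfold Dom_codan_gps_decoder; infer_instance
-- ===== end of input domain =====

-- B replaces A's two-phase pipeline (full bit-string then a bit_count state machine inserting
-- spaces) by one per-character map emitting each byte with its trailing space: simpler decomposition.

-- format(ascii_int, 'b').zfill(8): binary digits without leading zeros, left-padded with '0' to 8
def pvCharBits (c : Char) : List Char :=
  let d := Nat.toDigits 2 c.toNat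
  List.replicate (8 - d.length) '0' ++ d

-- ===== PORT A =====
-- helper signal_to_binary: 'binary += format(ord(char),"b").zfill(8)' over the chars
def signal_to_binary (signal : String) : List Char :=
  signal.toList.foldl (fun binary ch => binary ++ pvCharBits ch) []

-- 'bit_count += 1; output += bit; if bit_count == byte_bits: output += " "; bit_count = 0'
def pvByteStep (st : List Char × Nat) (bit : Char) : List Char × Nat :=
  let bc := st.2 + 1
  let out := st.1 ++ [bit]
  if bc = 8 then (out ++ [' '], 0) else (out, bc)

def codan_gps_decoder (signal : String) : String :=
  let binary := signal_to_binary signal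
  String.mk (binary.foldl pvByteStep ([], 0)).1

-- ===== PORT B =====
-- ''.join(format(ord(c),'b').zfill(8) + ' ' for c in signal)
def codan_gps_decoder_alt (signal : String) : String :=
  String.mk ((signal.toList.map (fun c => pvCharBits c ++ [' '])).flatten)

-- ===== PRECONDITION & SPEC =====
def Spec_codan_gps_decoder (signal : String) (out : String) : Prop := out = codan_gps_decoder_alt signal
instance (signal : String) (out : String) : Decidable (Spec_codan_gps_decoder signal out) := by unfold Spec_codan_gps_decoder; infer_instance

-- ===== CLAIM (what is proved, stated in full; the proofs are below) =====
def Claim_equal_codan_gps_decoder : Prop := ∀ (signal : String), Dom_codan_gps_decoder signal → Spec_codan_gps_decoder signal (codan_gps_decoder signal)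

-- ===== LEMMAS AND PROOFS =====

set_option maxRecDepth 4000 in
theorem toDigits_two_len_le : ∀ n : Fin 256, (Nat.toDigits 2 n.val).length ≤ 8 := by decide

theorem pvCharBits_len (c : Char) (h : c.toNat < 256) : (pvCharBits c).length = 8 := by
  have hle : (Nat.toDigits 2 c.toNat).length ≤ 8 := toDigits_two_len_le ⟨c.toNat, h⟩
  simp only [pvCharBits, List.length_append, List.length_replicate]
  omega

theorem eq_of_len8 (l : List Char) (h : l.length = 8) :
    ∃ a b c d e f g h', l = [a, b, c, d, e, f, g, h'] := by
  obtain ⟨a, l, rfl⟩ := List.exists_of_length_succ l h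
  simp only [List.length_cons] at h
  obtain ⟨b, l, rfl⟩ := List.exists_of_length_succ l (show l.length = 6 + 1 by omega)
  simp only [List.length_cons] at h
  obtain ⟨c, l, rfl⟩ := List.exists_of_length_succ l (show l.length = 5 + 1 by omega)
  simp only [List.length_cons] at h
  obtain ⟨d, l, rfl⟩ := List.exists_of_length_succ l (show l.length = 4 + 1 by omega)
  simp only [List.length_cons] at h
  obtain ⟨e, l, rfl⟩ := List.exists_of_length_succ l (show l.length = 3 + 1 by omega)
  simp only [List.length_cons] at h
  obtain ⟨f, l, rfl⟩ := List.exists_of_length_succ l (show l.length = 2 + 1 by omega)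
  simp only [List.length_cons] at h
  obtain ⟨g, l, rfl⟩ := List.exists_of_length_succ l (show l.length = 1 + 1 by omega)
  simp only [List.length_cons] at h
  obtain ⟨h', l, rfl⟩ := List.exists_of_length_succ l (show l.length = 0 + 1 by omega)
  simp only [List.length_cons] at h
  have : l = [] := List.eq_nil_of_length_eq_zero (by omega)
  exact ⟨a, b, c, d, e, f, g, h', by rw [this]⟩

theorem pvByteStep_chunk (a b c d e f g h : Char) (rest out : List Char) :
    List.foldl pvByteStep (out, 0) ([a, b, c, d, e, f, g, h] ++ rest) =
      List.foldl pvByteStep (out ++ [a, b, c, d, e, f, g, h, ' '], 0) rest := by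
  simp [pvByteStep]

theorem pvByteStep_flatMap (cs : List Char) (out : List Char)
    (hl : ∀ c ∈ cs, (pvCharBits c).length = 8) :
    List.foldl pvByteStep (out, 0) (cs.flatMap pvCharBits) =
      (out ++ (cs.map (fun c => pvCharBits c ++ [' '])).flatten, 0) := by
  induction cs generalizing out with
  | nil => simp
  | cons c cs ih =>
    obtain ⟨a, b, c3, d, e, f, g, h8, hc⟩ :=
      eq_of_len8 (pvCharBits c) (hl c (by simp))
    have hrest : ∀ x ∈ cs, (pvCharBits x).length = 8 := fun x hx => hl x (by simp [hx])
    rw [List.flatMap_cons, hc, pvByteStep_chunk, ih _ hrest]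
    simp [hc]

-- ===== VERDICT (by name: the statement is the Claim_ definition above) =====
theorem codan_gps_decoder_spec : Claim_equal_codan_gps_decoder := by
  intro signal hdom
  unfold Spec_codan_gps_decoder codan_gps_decoder codan_gps_decoder_alt signal_to_binary
  have hlens : ∀ c ∈ signal.toList, (pvCharBits c).length = 8 := by
    intro c hc
    apply pvCharBits_len
    have := List.all_eq_true.mp hdom c hc
    simp only [pvDomChar, Bool.or_eq_true, Bool.and_eq_true, decide_eq_true_eq,
      beq_iff_eq] at this
    omega
  rw [PySem.List.foldl_append_eq_flatMap]
  simp only [List.nil_append]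
  rw [pvByteStep_flatMap _ _ hlens]
  simp
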